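-- pv_equiv track=rewrite | github.com/desertwind77/interview | misc/substring_search.py | buildFiniteAutomataFast
-- ===== SOURCE A (Python) =====
-- MAX_CHARS = 256
--
-- def buildFiniteAutomataFast( pattern ):
--    # time = O( m * MAX_CHARS )
--    size = len( pattern )
--    finiteAutomata = \
--            [ [ 0 for _ in range( MAX_CHARS ) ] for _ in range( size + 1 ) ]
--
--    # Init the first row to 0
--    for i in range( MAX_CHARS ):
--       finiteAutomata[ 0 ][ i ] = 0
--    if len( pattern ) > 0:
--       finiteAutomata[ 0 ][ ord( pattern[ 0 ] ) ] = 1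
--
--    # lps = longest suffix that is also a suffix
--    lps = 0
--    for i in range( 1, len( pattern ) + 1 ):
--       for j in range( MAX_CHARS ):
--          # Copy values from row at index = lps
--          finiteAutomata[ i ][ j ] = finiteAutomata[ lps ][ j ]
--       if i < len( pattern ):
--          # Update the entry corresponding to this character
--          finiteAutomata[ i ][ ord( pattern[ i  ] ) ] = i + 1
--          # Update lps for next row to be filled
--          lps = finiteAutomata[ lps ][ ord( pattern[ i ] ) ]
--
--    return finiteAutomata
-- ===== SOURCE B (Python) =====
-- MAX_CHARS = 256
--
-- def buildFiniteAutomataFast(pattern):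
--     # per-cell DFA construction: each transition computed independently by a
--     # downward longest-border search, instead of maintaining a running lps row
--     size = len(pattern)
--     ords = [ord(ch) for ch in pattern]
--     present = set(ords)
--
--     def delta(s, c):
--         if s < size and c == ords[s]:
--             return s + 1
--         if c not in present:
--             return 0
--         for k in range(s, 0, -1):
--             if ords[k - 1] == c and pattern[:k - 1] == pattern[s - k + 1:s]:
--                 return k
--         return 0
--
--     return [[delta(s, c) for c in range(MAX_CHARS)] for s in range(size + 1)]
-- ===== Notes on version B (the rewrite author's own statement) =====
-- stated objective: alternative
-- what changed: B computes every DFA cell independently by a downward longest-border search (largest k with pattern[k-1]==c and pattern[:k-1] a suffix of pattern[:s]) instead of A's incremental construction that copies the lps row and maintains a running lps pointer.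
import Mathlib
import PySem

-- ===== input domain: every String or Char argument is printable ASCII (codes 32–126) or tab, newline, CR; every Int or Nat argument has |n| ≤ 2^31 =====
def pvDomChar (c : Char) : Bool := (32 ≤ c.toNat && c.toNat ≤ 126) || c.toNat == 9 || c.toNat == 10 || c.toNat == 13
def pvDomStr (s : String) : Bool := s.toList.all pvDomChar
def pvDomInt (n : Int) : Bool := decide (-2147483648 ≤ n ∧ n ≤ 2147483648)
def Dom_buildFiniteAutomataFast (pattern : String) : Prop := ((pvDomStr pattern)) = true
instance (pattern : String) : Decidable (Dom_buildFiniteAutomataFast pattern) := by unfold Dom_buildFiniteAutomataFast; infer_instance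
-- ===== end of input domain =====

-- B computes every DFA cell independently by a downward longest-border search instead of
-- A's incremental lps-row construction; objective: alternative algorithm (not faster).

-- ===== PORT A =====
-- literal transliteration of A: preallocated (size+1)×256 table, first row initialised,
-- then for i = 1..size copy row lps cell by cell into row i, patch, and advance lps.
def buildFiniteAutomataFast (pattern : String) : List (List Int) :=
  let p := pattern.toList
  let size := p.length
  let fa0 : List (List Int) := List.replicate (size + 1) (List.replicate 256 0)
  -- for i in range(MAX_CHARS): finiteAutomata[0][i] = 0
  let fa1 := fa0.set 0 ((List.range 256).foldl (fun r i => r.set i 0) (fa0.getD 0 []))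
  let fa2 := if size > 0 then fa1.set 0 ((fa1.getD 0 []).set (p.getD 0 ' ').toNat 1) else fa1
  (((List.range' 1 size).foldl (fun (st : List (List Int) × Nat) i =>
      -- for j in range(MAX_CHARS): finiteAutomata[i][j] = finiteAutomata[lps][j]
      let fa := (st.1).set i ((List.range 256).foldl
          (fun r j => r.set j (((st.1).getD st.2 []).getD j 0)) ((st.1).getD i []))
      if i < size then
        let fa' := fa.set i ((fa.getD i []).set (p.getD i ' ').toNat ((i : Int) + 1))
        (fa', (((fa'.getD st.2 []).getD (p.getD i ' ').toNat 0).toNat))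
      else (fa, st.2)) (fa2, 0)).1)

-- ===== PORT B =====
-- for k in range(s, 0, -1): if ord(pattern[k-1]) == c and pattern[:k-1] == pattern[s-k+1:s]: return k
def pvScan (p : List Char) (s c : Nat) : Nat → Nat
  | 0 => 0
  | k + 1 =>
    if (p.getD k ' ').toNat = c ∧ p.take k = (p.take s).drop (s - k) then k + 1
    else pvScan p s c k

def pvCell (p : List Char) (size s c : Nat) : Int :=
  if s < size ∧ c = (p.getD s ' ').toNat then (s : Int) + 1
  else if p.any (fun ch => ch.toNat == c) then (pvScan p s c s : Int)
  else 0

def buildFiniteAutomataFast_alt (pattern : String) : List (List Int) :=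
  let p := pattern.toList
  let size := p.length
  (List.range (size + 1)).map (fun s => (List.range 256).map (fun c => pvCell p size s c))

-- ===== PRECONDITION & SPEC =====
def Spec_buildFiniteAutomataFast (pattern : String) (out : List (List Int)) : Prop := out = buildFiniteAutomataFast_alt pattern
instance (pattern : String) (out : List (List Int)) : Decidable (Spec_buildFiniteAutomataFast pattern out) := by unfold Spec_buildFiniteAutomataFast; infer_instance

-- ===== CLAIM (what is proved, stated in full; the proofs are below) =====
def Claim_equal_buildFiniteAutomataFast : Prop := ∀ (pattern : String), Dom_buildFiniteAutomataFast pattern → Spec_buildFiniteAutomataFast pattern (buildFiniteAutomataFast pattern)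

-- ===== LEMMAS AND PROOFS =====

-- longest proper border of p.take i : largest k ≤ i-1 with p.take k a suffix of p.take i
def bordAux (p : List Char) (i : Nat) : Nat → Nat
  | 0 => 0
  | k + 1 => if p.take (k + 1) = (p.take i).drop (i - (k + 1)) then k + 1 else bordAux p i k

def bord (p : List Char) (i : Nat) : Nat := bordAux p i (i - 1)

def pvRow (p : List Char) (s : Nat) : List Int :=
  (List.range 256).map (fun c => pvCell p p.length s c)

def pvZRow : List Int := List.replicate 256 0

def faList (p : List Char) (t : Nat) : List (List Int) :=
  (List.range (t + 1)).map (pvRow p) ++ List.replicate (p.length - t) pvZRow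

lemma charToNat_inj {a b : Char} (h : a.toNat = b.toNat) : a = b := by
  apply Char.ext
  exact UInt32.toNat_inj.mp h

lemma take_eq_drop_iff_suffix (p : List Char) {k s : Nat} (hk : k ≤ s) (hs : s ≤ p.length) :
    p.take k = (p.take s).drop (s - k) ↔ p.take k <:+ p.take s := by
  rw [List.suffix_iff_eq_drop, List.length_take, List.length_take,
    Nat.min_eq_left (hk.trans hs), Nat.min_eq_left hs]

lemma suffix_of_suffix_le {a b c : List Char} (h1 : a <:+ c) (h2 : b <:+ c)
    (h : a.length ≤ b.length) : a <:+ b := by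
  rcases List.suffix_or_suffix_of_suffix h1 h2 with h' | h'
  · exact h'
  · rw [h'.sublist.eq_of_length_le h]

lemma take_succ_getD (p : List Char) {k : Nat} (h : k < p.length) :
    p.take (k + 1) = p.take k ++ [p.getD k ' '] := by
  rw [List.take_add_one, List.getElem?_eq_getElem h, List.getD_eq_getElem _ _ h]
  rfl

lemma concat_suffix_concat {a b : List Char} {x y : Char} :
    a ++ [x] <:+ b ++ [y] ↔ x = y ∧ a <:+ b := by
  constructor
  · rintro ⟨t, ht⟩
    rw [← List.append_assoc] at ht
    obtain ⟨h1, h2⟩ := List.append_inj' ht (by simp)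
    refine ⟨by simpa using h2, t, h1⟩
  · rintro ⟨rfl, t, rfl⟩
    exact ⟨t, by simp⟩

-- pvScan basic facts
lemma pvScan_le (p : List Char) (s c k : Nat) : pvScan p s c k ≤ k := by
  induction k with
  | zero => simp [pvScan]
  | succ k ih =>
    rw [pvScan]
    split
    · exact le_refl _
    · exact ih.trans (Nat.le_succ k)

lemma pvScan_spec (p : List Char) (s c k : Nat) :
    pvScan p s c k = 0 ∨ (1 ≤ pvScan p s c k ∧
      (p.getD (pvScan p s c k - 1) ' ').toNat = c ∧
      p.take (pvScan p s c k - 1) = (p.take s).drop (s - (pvScan p s c k - 1))) := by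
  induction k with
  | zero => left; rfl
  | succ k ih =>
    rw [pvScan]; split
    · next h => right; exact ⟨Nat.le_add_left 1 k, by simpa using h⟩
    · exact ih

lemma pvScan_ge (p : List Char) (s c k j : Nat) (hc : (p.getD j ' ').toNat = c)
    (hsuf : p.take j = (p.take s).drop (s - j)) (hj : j + 1 ≤ k) :
    j + 1 ≤ pvScan p s c k := by
  induction k with
  | zero => omega
  | succ k ih =>
    rw [pvScan]; split
    · next h => omega
    · next h =>
      rcases Nat.lt_or_ge j k with h' | h'
      · exact ih h'
      · have : j = k := by omega
        subst this
        exact absurd ⟨hc, hsuf⟩ h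

lemma pvScan_absent (p : List Char) (s c : Nat)
    (hnp : p.any (fun ch => ch.toNat == c) = false) (hs : s ≤ p.length) :
    ∀ k, k ≤ s → pvScan p s c k = 0 := by
  intro k
  induction k with
  | zero => intro _; rfl
  | succ k ih =>
    intro hk
    rw [pvScan, if_neg]
    · exact ih (by omega)
    · rintro ⟨hch, -⟩
      have hmem : p.getD k ' ' ∈ p := by
        rw [List.getD_eq_getElem _ _ (by omega)]
        exact List.getElem_mem (by omega)
      have := List.any_eq_false.mp hnp _ hmem
      simp only [beq_iff_eq] at this
      exact this hch

lemma pvCell_eq (p : List Char) (s c : Nat) (hs : s ≤ p.length) :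
    pvCell p p.length s c =
      if s < p.length ∧ c = (p.getD s ' ').toNat then (s : Int) + 1
      else (pvScan p s c s : Int) := by
  rw [pvCell]
  split_ifs with h1 h2
  · rfl
  · rfl
  · rw [pvScan_absent p s c (by simpa using h2) hs s (le_refl s)]
    rfl

-- bordAux basic facts
lemma bordAux_le (p : List Char) (i k : Nat) : bordAux p i k ≤ k := by
  induction k with
  | zero => simp [bordAux]
  | succ k ih =>
    rw [bordAux]
    split
    · exact le_refl _
    · exact ih.trans (Nat.le_succ k)

lemma bordAux_spec (p : List Char) (i k : Nat) :
    bordAux p i k = 0 ∨ (1 ≤ bordAux p i k ∧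
      p.take (bordAux p i k) = (p.take i).drop (i - bordAux p i k)) := by
  induction k with
  | zero => left; rfl
  | succ k ih =>
    rw [bordAux]; split
    · next h => right; exact ⟨Nat.le_add_left 1 k, h⟩
    · exact ih

lemma bordAux_ge (p : List Char) (i k j : Nat)
    (hsuf : p.take j = (p.take i).drop (i - j)) (h1 : 1 ≤ j) (hj : j ≤ k) :
    j ≤ bordAux p i k := by
  induction k with
  | zero => omega
  | succ k ih =>
    rw [bordAux]; split
    · next h => omega
    · next h =>
      rcases Nat.lt_or_ge j (k + 1) with h' | h'
      · exact ih (by omega)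
      · have : j = k + 1 := by omega
        subst this
        exact absurd hsuf h

lemma bord_le (p : List Char) (i : Nat) : bord p i ≤ i - 1 := bordAux_le p i (i - 1)

lemma bord_suffix (p : List Char) {i : Nat} (hi : i ≤ p.length) :
    p.take (bord p i) <:+ p.take i := by
  rcases bordAux_spec p i (i - 1) with h | ⟨_, h⟩
  · rw [bord, h]; simp
  · have hb : bord p i ≤ i := (bord_le p i).trans (Nat.sub_le i 1)
    exact (take_eq_drop_iff_suffix p hb hi).mp h

lemma bord_max (p : List Char) {i k : Nat} (hi : i ≤ p.length) (hk : k ≤ i - 1)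
    (hsuf : p.take k <:+ p.take i) : k ≤ bord p i := by
  rcases Nat.eq_zero_or_pos k with rfl | h1
  · exact Nat.zero_le _
  · exact bordAux_ge p i (i - 1) k
      ((take_eq_drop_iff_suffix p (hk.trans (Nat.sub_le i 1)) hi).mpr hsuf) h1 hk

-- KEY: the per-cell scan at state i equals B's cell rule at state bord p i
lemma pvScan_key (p : List Char) {i : Nat} (c : Nat) (h1 : 1 ≤ i) (h2 : i ≤ p.length) :
    pvScan p i c i =
      if bord p i < p.length ∧ c = (p.getD (bord p i) ' ').toNat then bord p i + 1
      else pvScan p (bord p i) c (bord p i) := by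
  have hbl : bord p i ≤ i - 1 := bord_le p i
  have hblt : bord p i < p.length := by omega
  have hbsuf : p.take (bord p i) <:+ p.take i := bord_suffix p h2
  split
  · next h =>
    obtain ⟨-, hc⟩ := h
    apply Nat.le_antisymm
    · rcases pvScan_spec p i c i with h0 | ⟨hr1, hrc, hrsuf⟩
      · omega
      · have hrle : pvScan p i c i ≤ i := pvScan_le p i c i
        have hs : p.take (pvScan p i c i - 1) <:+ p.take i :=
          (take_eq_drop_iff_suffix p (by omega) h2).mp hrsuf
        have := bord_max p h2 (k := pvScan p i c i - 1) (by omega) hs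
        omega
    · exact pvScan_ge p i c i (bord p i) hc.symm
        ((take_eq_drop_iff_suffix p (by omega) h2).mpr hbsuf) (by omega)
  · next h =>
    have hc : c ≠ (p.getD (bord p i) ' ').toNat := fun hh => h ⟨hblt, hh⟩
    apply Nat.le_antisymm
    · rcases pvScan_spec p i c i with h0 | ⟨hr1, hrc, hrsuf⟩
      · omega
      · have hrle : pvScan p i c i ≤ i := pvScan_le p i c i
        have hsuf : p.take (pvScan p i c i - 1) <:+ p.take i :=
          (take_eq_drop_iff_suffix p (by omega) h2).mp hrsuf
        have hrb : pvScan p i c i - 1 ≤ bord p i := bord_max p h2 (by omega) hsuf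
        have hne : pvScan p i c i - 1 ≠ bord p i := by
          intro he
          exact hc (by rw [← he]; exact hrc.symm)
        have hsuf2 : p.take (pvScan p i c i - 1) <:+ p.take (bord p i) :=
          suffix_of_suffix_le hsuf hbsuf
            (by rw [List.length_take, List.length_take]; omega)
        have := pvScan_ge p (bord p i) c (bord p i) (pvScan p i c i - 1) hrc
          ((take_eq_drop_iff_suffix p (by omega) (by omega)).mpr hsuf2) (by omega)
        omega
    · rcases pvScan_spec p (bord p i) c (bord p i) with h0 | ⟨hr1, hrc, hrsuf⟩
      · omega
      · have hrle : pvScan p (bord p i) c (bord p i) ≤ bord p i :=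
          pvScan_le p (bord p i) c (bord p i)
        have hsufb : p.take (pvScan p (bord p i) c (bord p i) - 1) <:+ p.take (bord p i) :=
          (take_eq_drop_iff_suffix p (by omega) (by omega)).mp hrsuf
        have hsufi := hsufb.trans hbsuf
        have := pvScan_ge p i c i (pvScan p (bord p i) c (bord p i) - 1) hrc
          ((take_eq_drop_iff_suffix p (by omega) h2).mpr hsufi) (by omega)
        omega

-- lps across a step: the border of p.take (i+1) is the scan at (i, p[i])
lemma bord_succ (p : List Char) {i : Nat} (_h1 : 1 ≤ i) (h2 : i < p.length) :
    bord p (i + 1) = pvScan p i ((p.getD i ' ').toNat) i := by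
  have hsplit : p.take (i + 1) = p.take i ++ [p.getD i ' '] := take_succ_getD p h2
  have hb : bord p (i + 1) = bordAux p (i + 1) i := rfl
  apply Nat.le_antisymm
  · rcases bordAux_spec p (i + 1) i with h0 | ⟨hL1, hLsuf⟩
    · rw [hb, h0]; omega
    · rw [hb] at *
      have hLle : bordAux p (i + 1) i ≤ i := bordAux_le p (i + 1) i
      have hsuf : p.take (bordAux p (i + 1) i) <:+ p.take (i + 1) :=
        (take_eq_drop_iff_suffix p (by omega) (by omega)).mp hLsuf
      have hLsplit : p.take (bordAux p (i + 1) i) =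
          p.take (bordAux p (i + 1) i - 1) ++ [p.getD (bordAux p (i + 1) i - 1) ' '] := by
        conv_lhs => rw [show bordAux p (i + 1) i = bordAux p (i + 1) i - 1 + 1 by omega]
        exact take_succ_getD p (by omega)
      rw [hLsplit, hsplit] at hsuf
      obtain ⟨hch, hsuf'⟩ := concat_suffix_concat.mp hsuf
      have := pvScan_ge p i ((p.getD i ' ').toNat) i (bordAux p (i + 1) i - 1) (by rw [hch])
        ((take_eq_drop_iff_suffix p (by omega) (le_of_lt h2)).mpr hsuf') (by omega)
      omega
  · rcases pvScan_spec p i ((p.getD i ' ').toNat) i with h0 | ⟨hr1, hrc, hrsuf⟩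
    · omega
    · have hrle : pvScan p i ((p.getD i ' ').toNat) i ≤ i := pvScan_le p i _ i
      have hch : p.getD (pvScan p i ((p.getD i ' ').toNat) i - 1) ' ' = p.getD i ' ' :=
        charToNat_inj hrc
      have hsuf : p.take (pvScan p i ((p.getD i ' ').toNat) i - 1) <:+ p.take i :=
        (take_eq_drop_iff_suffix p (by omega) (le_of_lt h2)).mp hrsuf
      have hsuf2 : p.take (pvScan p i ((p.getD i ' ').toNat) i) <:+ p.take (i + 1) := by
        conv_lhs => rw [show pvScan p i ((p.getD i ' ').toNat) i =
          pvScan p i ((p.getD i ' ').toNat) i - 1 + 1 by omega]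
        rw [take_succ_getD p (by omega), hsplit]
        exact concat_suffix_concat.mpr ⟨hch, hsuf⟩
      have := bordAux_ge p (i + 1) i (pvScan p i ((p.getD i ' ').toNat) i)
        ((take_eq_drop_iff_suffix p (by omega) (by omega)).mpr hsuf2) hr1 hrle
      rw [hb]
      omega

lemma pvRow_length (p : List Char) (s : Nat) : (pvRow p s).length = 256 := by
  simp [pvRow]

lemma pvRow_patch (p : List Char) {i : Nat} (h1 : 1 ≤ i) (h2 : i < p.length)
    (_hc : (p.getD i ' ').toNat < 256) :
    (pvRow p (bord p i)).set ((p.getD i ' ').toNat) ((i : Int) + 1) = pvRow p i := by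
  apply List.ext_getElem (by simp [pvRow])
  intro j hj hj'
  rw [List.getElem_set]
  simp only [pvRow, List.getElem_map, List.getElem_range]
  by_cases he : (p.getD i ' ').toNat = j
  · rw [if_pos he, pvCell_eq p i j (le_of_lt h2), if_pos ⟨h2, he.symm⟩]
  · rw [if_neg he]
    conv_rhs => rw [pvCell_eq p i j (le_of_lt h2)]
    rw [if_neg (fun hh => he (hh.2.symm)), pvScan_key p (i := i) j h1 (le_of_lt h2),
      pvCell_eq p (bord p i) j (by have := bord_le p i; omega)]
    split_ifs with hcond
    · push_cast; ring
    · rfl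

lemma pvRow_last (p : List Char) (h1 : 1 ≤ p.length) :
    pvRow p (bord p p.length) = pvRow p p.length := by
  apply List.ext_getElem (by simp [pvRow])
  intro j hj hj'
  simp only [pvRow, List.getElem_map, List.getElem_range]
  conv_rhs => rw [pvCell_eq p p.length j (le_refl _)]
  rw [if_neg (fun hh => lt_irrefl _ hh.1), pvScan_key p (i := p.length) j h1 (le_refl _),
    pvCell_eq p (bord p p.length) j (by have := bord_le p p.length; omega)]
  split_ifs with hcond
  · push_cast; ring
  · rfl

lemma pvRow_lpsRead (p : List Char) {i : Nat} (h1 : 1 ≤ i) (h2 : i < p.length)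
    (hc : (p.getD i ' ').toNat < 256) :
    (((pvRow p (bord p i)).getD ((p.getD i ' ').toNat) 0).toNat) = bord p (i + 1) := by
  rw [pvRow, List.getD_eq_getElem _ _ (by simpa using hc)]
  rw [List.getElem_map, List.getElem_range]
  rw [bord_succ p h1 h2, pvScan_key p (i := i) _ h1 (le_of_lt h2),
    pvCell_eq p (bord p i) _ (by have := bord_le p i; omega)]
  split_ifs with hcond
  · rw [show ((bord p i : Int) + 1) = ((bord p i + 1 : Nat) : Int) by push_cast; ring]
    exact Int.toNat_natCast _
  · exact Int.toNat_natCast _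

lemma copyFold (src r0 : List Int) (n : Nat) (h1 : n ≤ src.length) (h2 : src.length = r0.length) :
    (List.range n).foldl (fun r j => r.set j (src.getD j 0)) r0 = src.take n ++ r0.drop n := by
  induction n with
  | zero => simp
  | succ n ih =>
    have hn : n < src.length := by omega
    have hn' : n < r0.length := by omega
    rw [List.range_succ, List.foldl_append, ih (by omega)]
    simp only [List.foldl_cons, List.foldl_nil]
    rw [List.set_append, List.length_take, Nat.min_eq_left (by omega),
      if_neg (lt_irrefl n), Nat.sub_self, List.drop_eq_getElem_cons hn',
      List.getD_eq_getElem _ _ hn]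
    rw [← List.take_append_getElem hn, List.append_assoc]
    rfl

lemma copyFold_full (src r0 : List Int) (h1 : src.length = 256) (h2 : r0.length = 256) :
    (List.range 256).foldl (fun r j => r.set j (src.getD j 0)) r0 = src := by
  rw [copyFold src r0 256 (by omega) (by omega), List.take_of_length_le (by omega),
    List.drop_of_length_le (by omega), List.append_nil]

lemma zeroFold (n m : Nat) :
    (List.range n).foldl (fun (r : List Int) i => r.set i 0) (List.replicate m 0) =
      List.replicate m 0 := by
  induction n with
  | zero => rfl
  | succ n ih => rw [List.range_succ, List.foldl_append, ih]; simp [List.set_replicate_self]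

lemma pvRow_zero (p : List Char) (h1 : 0 < p.length) (_hc : (p.getD 0 ' ').toNat < 256) :
    (List.replicate 256 (0 : Int)).set ((p.getD 0 ' ').toNat) 1 = pvRow p 0 := by
  apply List.ext_getElem
    (by rw [List.length_set, List.length_replicate, pvRow, List.length_map, List.length_range])
  intro j hj hj'
  rw [List.getElem_set]
  simp only [pvRow, List.getElem_map, List.getElem_range, List.getElem_replicate]
  by_cases he : (p.getD 0 ' ').toNat = j
  · rw [if_pos he, pvCell_eq p 0 j (by omega), if_pos ⟨h1, he.symm⟩]
    rfl
  · rw [if_neg he, pvCell_eq p 0 j (by omega), if_neg (fun hh => he (hh.2.symm))]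
    rfl

lemma faList_getD (p : List Char) {t j : Nat} (hj : j ≤ t) :
    (faList p t).getD j [] = pvRow p j := by
  rw [faList, List.getD_append _ _ _ j (by simp; omega)]
  rw [List.getD_eq_getElem _ _ (by simp; omega)]
  simp

lemma faList_getD_zero (p : List Char) {t j : Nat} (hj : t < j) (hj2 : j ≤ p.length) :
    (faList p t).getD j [] = pvZRow := by
  rw [faList, List.getD_append_right _ _ _ j (by simp; omega)]
  simp only [List.length_map, List.length_range]
  rw [List.getD_eq_getElem _ _ (by simp; omega)]
  simp

lemma maps_getD (p : List Char) {n j : Nat} (hj : j < n) :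
    ((List.range n).map (pvRow p)).getD j [] = pvRow p j := by
  rw [List.getD_eq_getElem _ _ (by simp; omega)]
  simp

lemma getD_mid {α : Type} (a : List α) (x : α) (b : List α) (d : α) {n : Nat}
    (h : a.length = n) : (a ++ x :: b).getD n d = x := by
  subst h
  rw [List.getD_append_right _ _ _ _ (le_refl _), Nat.sub_self]
  rfl

lemma set_mid {α : Type} (a : List α) (x : α) (b : List α) (r : α) {n : Nat}
    (h : a.length = n) : (a ++ x :: b).set n r = a ++ r :: b := by
  subst h
  rw [List.set_append, if_neg (lt_irrefl _), Nat.sub_self]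
  rfl

lemma faList_set (p : List Char) {t : Nat} (ht : t < p.length) (r : List Int) :
    (faList p t).set (t + 1) r =
      (List.range (t + 1)).map (pvRow p) ++ r :: List.replicate (p.length - t - 1) pvZRow := by
  rw [faList, List.set_append, if_neg (by simp)]
  simp only [List.length_map, List.length_range, Nat.sub_self]
  rw [show p.length - t = (p.length - t - 1) + 1 by omega, List.replicate_succ]
  rfl

-- the loop invariant
lemma loop_inv (p : List Char) (hm : 1 ≤ p.length) (hdom : ∀ c ∈ p, c.toNat < 256)
    (t : Nat) (ht : t ≤ p.length) :
    (List.range' 1 t).foldl (fun (st : List (List Int) × Nat) i =>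
      let fa := (st.1).set i ((List.range 256).foldl
          (fun r j => r.set j (((st.1).getD st.2 []).getD j 0)) ((st.1).getD i []))
      if i < p.length then
        let fa' := fa.set i ((fa.getD i []).set (p.getD i ' ').toNat ((i : Int) + 1))
        (fa', (((fa'.getD st.2 []).getD (p.getD i ' ').toNat 0).toNat))
      else (fa, st.2)) (faList p 0, 0)
    = (faList p t, bord p (min (t + 1) p.length)) := by
  have hclt : ∀ j, j < p.length → (p.getD j ' ').toNat < 256 := fun j hj => by
    rw [List.getD_eq_getElem _ _ hj]
    exact hdom _ (List.getElem_mem hj)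
  induction t with
  | zero =>
    rw [show List.range' 1 0 = [] from rfl, List.foldl_nil, Nat.min_eq_left hm]
    rfl
  | succ t ih =>
    have htlt : t < p.length := by omega
    have hbL : bord p (t + 1) ≤ t := by have := bord_le p (t + 1); omega
    have hmapslen : ((List.range (t + 1)).map (pvRow p)).length = t + 1 := by simp
    rw [List.range'_1_concat, List.foldl_append, ih (by omega)]
    simp only [List.foldl_cons, List.foldl_nil]
    rw [Nat.min_eq_left (by omega : t + 1 ≤ p.length), Nat.add_comm 1 t]
    rw [faList_getD p hbL, faList_getD_zero p (Nat.lt_succ_self t) (by omega),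
      copyFold_full (pvRow p (bord p (t + 1))) pvZRow (pvRow_length p _) (by rw [pvZRow, List.length_replicate]),
      faList_set p htlt (pvRow p (bord p (t + 1)))]
    by_cases hlt : t + 1 < p.length
    · rw [if_pos hlt]
      rw [getD_mid _ _ _ _ hmapslen,
        pvRow_patch p (by omega) hlt (hclt (t + 1) hlt),
        set_mid _ _ _ _ hmapslen,
        List.getD_append _ _ _ _ (by rw [hmapslen]; omega), maps_getD p (by omega),
        pvRow_lpsRead p (by omega) hlt (hclt (t + 1) hlt)]
      rw [Nat.min_eq_left (by omega)]
      refine congrArg₂ Prod.mk ?_ rfl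
      conv_rhs => rw [faList, List.range_succ, List.map_append, List.append_assoc,
        show p.length - (t + 1) = p.length - t - 1 from by omega]
      rfl
    · rw [if_neg hlt]
      have hm' : t + 1 = p.length := by omega
      rw [show p.length - t - 1 = 0 from by omega]
      refine congrArg₂ Prod.mk ?_ ?_
      · conv_rhs => rw [faList, List.range_succ, List.map_append, List.append_assoc,
          show p.length - (t + 1) = 0 from by omega]
        have hrow : pvRow p (bord p (t + 1)) = pvRow p (t + 1) := by
          rw [hm']
          exact pvRow_last p (by omega)
        rw [hrow]
        rfl
      · rw [show min (t + 1 + 1) p.length = t + 1 from by omega]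

-- ===== VERDICT (by name: the statement is the Claim_ definition above) =====
theorem buildFiniteAutomataFast_spec : Claim_equal_buildFiniteAutomataFast := by
  intro pattern hdom
  unfold Spec_buildFiniteAutomataFast
  have hdom' : ∀ c ∈ pattern.toList, c.toNat < 256 := by
    intro c hcmem
    have h := List.all_eq_true.mp hdom c hcmem
    simp only [pvDomChar, Bool.or_eq_true, Bool.and_eq_true, decide_eq_true_eq,
      beq_iff_eq] at h
    omega
  have hclt : ∀ j, j < pattern.toList.length → (pattern.toList.getD j ' ').toNat < 256 := by
    intro j hj
    rw [List.getD_eq_getElem _ _ hj]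
    exact hdom' _ (List.getElem_mem hj)
  dsimp only [buildFiniteAutomataFast, buildFiniteAutomataFast_alt]
  rcases Nat.eq_zero_or_pos pattern.toList.length with hm | hm
  · rw [hm]
    rw [if_neg (lt_irrefl 0), show List.range' 1 0 = [] from rfl, List.foldl_nil]
    have h0 : (List.replicate (0 + 1) (List.replicate 256 (0 : Int))).getD 0 [] =
        List.replicate 256 (0 : Int) := by
      rw [List.getD_eq_getElem _ _ (by rw [List.length_replicate]; omega)]
      rw [List.getElem_replicate]
    rw [h0, zeroFold, List.set_replicate_self]
    apply List.ext_getElem (by rw [List.length_replicate, List.length_map, List.length_range])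
    intro j hj hj'
    have hj0 : j = 0 := by
      rw [List.length_map, List.length_range] at hj'
      omega
    subst hj0
    rw [List.getElem_replicate, List.getElem_map, List.getElem_range]
    apply List.ext_getElem
      (by rw [List.length_replicate, List.length_map, List.length_range])
    intro i hi hi'
    have hcell := pvCell_eq pattern.toList 0 i (by omega)
    rw [hm] at hcell
    rw [List.getElem_replicate, List.getElem_map, List.getElem_range, hcell,
      if_neg (fun hh => by omega)]
    rfl
  · have h0 : (List.replicate (pattern.toList.length + 1) (List.replicate 256 (0 : Int))).getD 0 [] =
        List.replicate 256 (0 : Int) := by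
      rw [List.getD_eq_getElem _ _ (by rw [List.length_replicate]; omega)]
      rw [List.getElem_replicate]
    rw [h0, zeroFold, List.set_replicate_self, if_pos hm, h0,
      pvRow_zero pattern.toList hm (hclt 0 hm)]
    have hinit : (List.replicate (pattern.toList.length + 1) (List.replicate 256 (0 : Int))).set 0
        (pvRow pattern.toList 0) = faList pattern.toList 0 := by
      rw [List.replicate_succ, faList, show List.range 1 = [0] from rfl, Nat.sub_zero]
      rfl
    rw [hinit, loop_inv pattern.toList hm hdom' pattern.toList.length (le_refl _)]
    rw [show ((faList pattern.toList pattern.toList.length,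
      bord pattern.toList (min (pattern.toList.length + 1) pattern.toList.length)) :
        List (List Int) × Nat).1 = faList pattern.toList pattern.toList.length from rfl]
    rw [faList, Nat.sub_self, show (List.replicate 0 pvZRow : List (List Int)) = [] from rfl,
      List.append_nil]
    rfl
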